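-- pv_equiv track=rewrite | github.com/al3xandros/music-player | app.py | strip_ext
-- ===== SOURCE A (Python) =====
-- def strip_ext(f: str):
--     ext = [".mp3", ".m4a", ".aif", ".wav",
--            ".mid", ".wow", ".ogg", ".wma",
--            ".flac", ".wave"
--            ]
--     n = f.lower()
--     for i in ext:
--         if n.endswith(i):
--             return f[:-len(i)]
--     return f
-- ===== SOURCE B (Python) =====
-- # Trie of the known extensions, spelled backwards: the reversed, lowercased
-- # filename is matched character by character against this tree; reaching an
-- # int leaf means a known extension was found and tells how much to cut off.
-- _TRIE = {
--     '3': {'p': {'m': {'.': 4}}},            # .mp3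
--     'a': {'4': {'m': {'.': 4}},             # .m4a
--           'm': {'w': {'.': 4}}},            # .wma
--     'f': {'i': {'a': {'.': 4}}},            # .aif
--     'v': {'a': {'w': {'.': 4}}},            # .wav
--     'd': {'i': {'m': {'.': 4}}},            # .mid
--     'w': {'o': {'w': {'.': 4}}},            # .wow
--     'g': {'g': {'o': {'.': 4}}},            # .ogg
--     'c': {'a': {'l': {'f': {'.': 5}}}},     # .flac
--     'e': {'v': {'a': {'w': {'.': 5}}}},     # .wave
-- }
--
--
-- def strip_ext(f: str):
--     node = _TRIE
--     for c in reversed(f.lower()):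
--         nxt = node.get(c)
--         if nxt is None:
--             return f
--         if isinstance(nxt, int):
--             return f[:-nxt]
--         node = nxt
--     return f
-- ===== Notes on version B (the rewrite author's own statement) =====
-- stated objective: alternative
-- what changed: Replaces A's loop that runs endswith against each of the ten extensions by a single right-to-left walk of the lowercased filename through a trie of the reversed extensions, cutting at an int leaf.
import Mathlib
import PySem

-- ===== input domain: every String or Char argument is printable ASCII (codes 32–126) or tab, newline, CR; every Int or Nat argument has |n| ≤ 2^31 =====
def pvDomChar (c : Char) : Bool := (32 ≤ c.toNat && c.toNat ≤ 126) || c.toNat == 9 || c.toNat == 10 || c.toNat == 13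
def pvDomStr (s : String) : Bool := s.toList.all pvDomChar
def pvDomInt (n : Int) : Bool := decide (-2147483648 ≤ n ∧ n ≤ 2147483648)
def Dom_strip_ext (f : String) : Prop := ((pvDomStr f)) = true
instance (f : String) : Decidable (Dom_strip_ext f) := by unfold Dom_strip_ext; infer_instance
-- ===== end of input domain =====

-- B replaces A's per-extension endswith scan by a single right-to-left pass of the
-- lowercased filename through a trie of the reversed extensions (objective: alternative).

-- ===== PORT A =====
-- the 'for i in ext: if n.endswith(i): return f[:-len(i)]' loop with early return
def stripExtLoop (f n : String) : List String → String
  | [] => f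
  | i :: rest =>
      if PySem.Str.endswith n i then PySem.Str.slice f none (some (-(PySem.Str.len i : Int)))
      else stripExtLoop f n rest

def strip_ext (f : String) : String :=
  let ext := [".mp3", ".m4a", ".aif", ".wav", ".mid", ".wow", ".ogg", ".wma", ".flac", ".wave"]
  let n := PySem.Str.lower f
  stripExtLoop f n ext

-- ===== PORT B =====
-- the nested-dict trie _TRIE of Source B: an int value is a leaf (how much to cut off),
-- a dict value is an inner node (a mutual pair instead of a nested inductive)
mutual
inductive PTrie where
  | leaf : Nat → PTrie
  | node : PKids → PTrie
deriving DecidableEq, Repr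
inductive PKids where
  | nil : PKids
  | cons : Char → PTrie → PKids → PKids
deriving DecidableEq, Repr
end

-- node.get(c)
def pkFind : PKids → Char → Option PTrie
  | .nil, _ => none
  | .cons k t rest, c => if c = k then some t else pkFind rest c

-- a single-branch chain ending in a leaf (used to spell out the literal _TRIE)
def chainK : List Char → Nat → PTrie
  | [], n => .leaf n
  | c :: cs, n => .node (.cons c (chainK cs n) .nil)

-- the literal _TRIE of Source B
def pvTrie : PKids :=
  .cons '3' (chainK ['p', 'm', '.'] 4)                                       -- .mp3
  (.cons 'a' (.node (.cons '4' (chainK ['m', '.'] 4)                         -- .m4a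
                    (.cons 'm' (chainK ['w', '.'] 4) .nil)))                 -- .wma
  (.cons 'f' (chainK ['i', 'a', '.'] 4)                                      -- .aif
  (.cons 'v' (chainK ['a', 'w', '.'] 4)                                      -- .wav
  (.cons 'd' (chainK ['i', 'm', '.'] 4)                                      -- .mid
  (.cons 'w' (chainK ['o', 'w', '.'] 4)                                      -- .wow
  (.cons 'g' (chainK ['g', 'o', '.'] 4)                                      -- .ogg
  (.cons 'c' (chainK ['a', 'l', 'f', '.'] 5)                                 -- .flac
  (.cons 'e' (chainK ['v', 'a', 'w', '.'] 5) .nil))))))))                    -- .wave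

-- the 'for c in reversed(f.lower())' walk with its three exits
def walkTrie (f : String) : List Char → PKids → String
  | [], _ => f
  | c :: rest, kids =>
      match pkFind kids c with
      | none => f
      | some (.leaf n) => PySem.Str.slice f none (some (-(n : Int)))
      | some (.node ks) => walkTrie f rest ks

def strip_ext_alt (f : String) : String :=
  walkTrie f (PySem.Str.lower f).toList.reverse pvTrie

-- ===== PRECONDITION & SPEC =====
def Spec_strip_ext (f : String) (out : String) : Prop := out = strip_ext_alt f
instance (f : String) (out : String) : Decidable (Spec_strip_ext f out) := by unfold Spec_strip_ext; infer_instance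

-- ===== CLAIM (what is proved, stated in full; the proofs are below) =====
def Claim_equal_strip_ext : Prop := ∀ (f : String), Dom_strip_ext f → Spec_strip_ext f (strip_ext f)

-- ===== LEMMAS AND PROOFS =====

-- common reference point: both programs as one chain of take-conditions on the reversed list
def specStrip (f : String) (r : List Char) : String :=
  if r.take 4 = ['3', 'p', 'm', '.'] then PySem.Str.slice f none (some (-4))
  else if r.take 4 = ['a', '4', 'm', '.'] then PySem.Str.slice f none (some (-4))
  else if r.take 4 = ['f', 'i', 'a', '.'] then PySem.Str.slice f none (some (-4))
  else if r.take 4 = ['v', 'a', 'w', '.'] then PySem.Str.slice f none (some (-4))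
  else if r.take 4 = ['d', 'i', 'm', '.'] then PySem.Str.slice f none (some (-4))
  else if r.take 4 = ['w', 'o', 'w', '.'] then PySem.Str.slice f none (some (-4))
  else if r.take 4 = ['g', 'g', 'o', '.'] then PySem.Str.slice f none (some (-4))
  else if r.take 4 = ['a', 'm', 'w', '.'] then PySem.Str.slice f none (some (-4))
  else if r.take 5 = ['c', 'a', 'l', 'f', '.'] then PySem.Str.slice f none (some (-5))
  else if r.take 5 = ['e', 'v', 'a', 'w', '.'] then PySem.Str.slice f none (some (-5))
  else f

theorem ends_take (n e : String) (k : Nat) (hk : e.toList.length = k) :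
    PySem.Str.endswith n e = true ↔ n.toList.reverse.take k = e.toList.reverse := by
  rw [PySem.Str.endswith_eq, PySem.Chars.endswith_iff, ← List.reverse_prefix,
      List.prefix_iff_eq_take, List.length_reverse, hk, eq_comm]

-- walking down a single-branch chain matches exactly that chain
theorem walk_chain (f : String) (m : Nat) : ∀ (c : Char) (cs l : List Char),
    walkTrie f l (.cons c (chainK cs m) .nil) =
      if l.take (cs.length + 1) = c :: cs then PySem.Str.slice f none (some (-(m : Int))) else f := by
  intro c cs
  induction cs generalizing c with
  | nil =>
      intro l
      rcases l with _ | ⟨x, l⟩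
      · simp [walkTrie]
      · by_cases hx : x = c
        · subst hx; simp [walkTrie, pkFind, chainK]
        · simp [walkTrie, pkFind, hx]
  | cons c2 cs ih =>
      intro l
      rcases l with _ | ⟨x, l⟩
      · simp [walkTrie]
      · by_cases hx : x = c
        · subst hx
          have step : walkTrie f (x :: l) (.cons x (chainK (c2 :: cs) m) .nil)
              = walkTrie f l (.cons c2 (chainK cs m) .nil) := by
            simp [walkTrie, pkFind, chainK]
          rw [step, ih c2 l]
          simp [List.take]
        · simp [walkTrie, pkFind, hx, List.take]

def kidsA : PKids :=
  .cons '4' (chainK ['m', '.'] 4) (.cons 'm' (chainK ['w', '.'] 4) .nil)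

theorem walk_spec (f : String) (r : List Char) : walkTrie f r pvTrie = specStrip f r := by
  rcases r with _ | ⟨c, l⟩
  · simp [walkTrie, specStrip]
  by_cases h3 : c = '3'
  · subst h3
    have step : walkTrie f ('3' :: l) pvTrie
        = walkTrie f l (.cons 'p' (chainK ['m', '.'] 4) .nil) := rfl
    rw [step, walk_chain]
    simp [specStrip]
  by_cases ha : c = 'a'
  · subst ha
    have step : walkTrie f ('a' :: l) pvTrie = walkTrie f l kidsA := rfl
    rw [step]
    rcases l with _ | ⟨x, l⟩
    · simp [walkTrie, specStrip]
    by_cases h4 : x = '4'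
    · subst h4
      have step2 : walkTrie f ('4' :: l) kidsA
          = walkTrie f l (.cons 'm' (chainK ['.'] 4) .nil) := rfl
      rw [step2, walk_chain]
      simp [specStrip]
    by_cases hm : x = 'm'
    · subst hm
      have step2 : walkTrie f ('m' :: l) kidsA
          = walkTrie f l (.cons 'w' (chainK ['.'] 4) .nil) := rfl
      rw [step2, walk_chain]
      simp [specStrip]
    · simp [walkTrie, kidsA, pkFind, h4, hm, specStrip]
  by_cases hf : c = 'f'
  · subst hf
    have step : walkTrie f ('f' :: l) pvTrie
        = walkTrie f l (.cons 'i' (chainK ['a', '.'] 4) .nil) := rfl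
    rw [step, walk_chain]
    simp [specStrip]
  by_cases hv : c = 'v'
  · subst hv
    have step : walkTrie f ('v' :: l) pvTrie
        = walkTrie f l (.cons 'a' (chainK ['w', '.'] 4) .nil) := rfl
    rw [step, walk_chain]
    simp [specStrip]
  by_cases hd : c = 'd'
  · subst hd
    have step : walkTrie f ('d' :: l) pvTrie
        = walkTrie f l (.cons 'i' (chainK ['m', '.'] 4) .nil) := rfl
    rw [step, walk_chain]
    simp [specStrip]
  by_cases hw : c = 'w'
  · subst hw
    have step : walkTrie f ('w' :: l) pvTrie
        = walkTrie f l (.cons 'o' (chainK ['w', '.'] 4) .nil) := rfl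
    rw [step, walk_chain]
    simp [specStrip]
  by_cases hg : c = 'g'
  · subst hg
    have step : walkTrie f ('g' :: l) pvTrie
        = walkTrie f l (.cons 'g' (chainK ['o', '.'] 4) .nil) := rfl
    rw [step, walk_chain]
    simp [specStrip]
  by_cases hc : c = 'c'
  · subst hc
    have step : walkTrie f ('c' :: l) pvTrie
        = walkTrie f l (.cons 'a' (chainK ['l', 'f', '.'] 5) .nil) := rfl
    rw [step, walk_chain]
    simp [specStrip]
  by_cases he : c = 'e'
  · subst he
    have step : walkTrie f ('e' :: l) pvTrie
        = walkTrie f l (.cons 'v' (chainK ['a', 'w', '.'] 5) .nil) := rfl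
    rw [step, walk_chain]
    simp [specStrip]
  · simp [walkTrie, pvTrie, pkFind, h3, ha, hf, hv, hd, hw, hg, hc, he, specStrip]

theorem a_spec (f : String) :
    strip_ext f = specStrip f (PySem.Str.lower f).toList.reverse := by
  simp only [strip_ext, stripExtLoop]
  have e1 := ends_take (PySem.Str.lower f) ".mp3" 4 (by decide)
  have e2 := ends_take (PySem.Str.lower f) ".m4a" 4 (by decide)
  have e3 := ends_take (PySem.Str.lower f) ".aif" 4 (by decide)
  have e4 := ends_take (PySem.Str.lower f) ".wav" 4 (by decide)
  have e5 := ends_take (PySem.Str.lower f) ".mid" 4 (by decide)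
  have e6 := ends_take (PySem.Str.lower f) ".wow" 4 (by decide)
  have e7 := ends_take (PySem.Str.lower f) ".ogg" 4 (by decide)
  have e8 := ends_take (PySem.Str.lower f) ".wma" 4 (by decide)
  have e9 := ends_take (PySem.Str.lower f) ".flac" 5 (by decide)
  have e10 := ends_take (PySem.Str.lower f) ".wave" 5 (by decide)
  rw [show (".mp3" : String).toList.reverse = ['3', 'p', 'm', '.'] from rfl] at e1
  rw [show (".m4a" : String).toList.reverse = ['a', '4', 'm', '.'] from rfl] at e2
  rw [show (".aif" : String).toList.reverse = ['f', 'i', 'a', '.'] from rfl] at e3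
  rw [show (".wav" : String).toList.reverse = ['v', 'a', 'w', '.'] from rfl] at e4
  rw [show (".mid" : String).toList.reverse = ['d', 'i', 'm', '.'] from rfl] at e5
  rw [show (".wow" : String).toList.reverse = ['w', 'o', 'w', '.'] from rfl] at e6
  rw [show (".ogg" : String).toList.reverse = ['g', 'g', 'o', '.'] from rfl] at e7
  rw [show (".wma" : String).toList.reverse = ['a', 'm', 'w', '.'] from rfl] at e8
  rw [show (".flac" : String).toList.reverse = ['c', 'a', 'l', 'f', '.'] from rfl] at e9
  rw [show (".wave" : String).toList.reverse = ['e', 'v', 'a', 'w', '.'] from rfl] at e10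
  simp only [specStrip, e1, e2, e3, e4, e5, e6, e7, e8, e9, e10,
    show (-(PySem.Str.len ".mp3" : Int)) = -4 from by decide,
    show (-(PySem.Str.len ".m4a" : Int)) = -4 from by decide,
    show (-(PySem.Str.len ".aif" : Int)) = -4 from by decide,
    show (-(PySem.Str.len ".wav" : Int)) = -4 from by decide,
    show (-(PySem.Str.len ".mid" : Int)) = -4 from by decide,
    show (-(PySem.Str.len ".wow" : Int)) = -4 from by decide,
    show (-(PySem.Str.len ".ogg" : Int)) = -4 from by decide,
    show (-(PySem.Str.len ".wma" : Int)) = -4 from by decide,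
    show (-(PySem.Str.len ".flac" : Int)) = -5 from by decide,
    show (-(PySem.Str.len ".wave" : Int)) = -5 from by decide]

-- ===== VERDICT (by name: the statement is the Claim_ definition above) =====
theorem strip_ext_spec : Claim_equal_strip_ext := by
  intro f _
  unfold Spec_strip_ext strip_ext_alt
  rw [a_spec, walk_spec]
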